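-- pv_equiv track=rewrite | github.com/tconcan/Instagram-Social-Network | presets.py | flower_generation
-- ===== SOURCE A (Python) =====
-- def flower_generation(petals, petal_size):
--
--     graph = []
--     node = 1
--     for petal in range(petals):
--         prev = 0
--         while(node <= petal * petal_size + petal_size):
--             graph.append([prev, node])
--             prev = node
--             node += 1
--         graph.append([prev, 0])
--
--     return graph
-- ===== SOURCE B (Python) =====
-- def flower_generation(petals, petal_size):
--     m = max(petal_size, 0)
--     edges = []
--     for k in range(petals * (m + 1)):
--         p, j = divmod(k, m + 1)
--         a = 0 if j == 0 else p * m + j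
--         b = 0 if j == m else p * m + j + 1
--         edges.append([a, b])
--     return edges
-- ===== Notes on version B (the rewrite author's own statement) =====
-- stated objective: alternative
-- what changed: Replaces A's nested loops with a persistent cross-petal node counter and prev/node accumulator by a single flat loop over all edge indices, recovering each edge's petal and position via divmod and emitting both endpoints from a closed-form formula (0 at the petal boundaries, p*m+j inside).
import Mathlib
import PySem

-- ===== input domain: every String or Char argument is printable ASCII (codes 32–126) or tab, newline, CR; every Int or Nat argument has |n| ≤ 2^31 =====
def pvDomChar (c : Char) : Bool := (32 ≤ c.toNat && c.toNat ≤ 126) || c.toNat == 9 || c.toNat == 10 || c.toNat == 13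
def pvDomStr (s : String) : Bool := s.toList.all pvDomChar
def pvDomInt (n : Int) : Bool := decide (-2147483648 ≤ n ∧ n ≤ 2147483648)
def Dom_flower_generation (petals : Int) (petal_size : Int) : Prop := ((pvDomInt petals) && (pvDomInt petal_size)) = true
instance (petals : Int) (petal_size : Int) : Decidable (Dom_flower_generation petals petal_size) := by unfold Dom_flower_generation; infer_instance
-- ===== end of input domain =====

-- B replaces A's nested loops and persistent node counter by one flat loop over edge
-- indices, computing each edge's endpoints in closed form from divmod (alternative decomposition).


-- ===== PORT A =====
-- the inner 'while node <= bound: graph.append([prev, node]); prev = node; node += 1';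
-- returns (graph, prev, node)
def pvInnerA (bound : Int) (prev : Int) (node : Int) (graph : List (List Int)) :
    List (List Int) × Int × Int :=
  if node ≤ bound then
    pvInnerA bound node (node + 1) (graph ++ [[prev, node]])
  else
    (graph, prev, node)
termination_by (bound + 1 - node).toNat
decreasing_by omega

def flower_generation (petals : Int) (petal_size : Int) : List (List Int) :=
  ((PySem.List.pyRange 0 petals 1).foldl
    (fun (s : List (List Int) × Int) petal =>
      let r := pvInnerA (petal * petal_size + petal_size) 0 s.2 s.1
      (r.1 ++ [[r.2.1, 0]], r.2.2))
    ([], 1)).1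

-- ===== PORT B =====
def flower_generation_alt (petals : Int) (petal_size : Int) : List (List Int) :=
  let m := max petal_size 0
  (PySem.List.pyRange 0 (petals * (m + 1)) 1).foldl
    (fun edges k =>
      let p := PySem.Int.floordiv k (m + 1)
      let j := PySem.Int.mod k (m + 1)
      let a := if j = 0 then 0 else p * m + j
      let b := if j = m then 0 else p * m + j + 1
      edges ++ [[a, b]])
    []

-- ===== PRECONDITION & SPEC =====
def Spec_flower_generation (petals : Int) (petal_size : Int) (out : List (List Int)) : Prop := out = flower_generation_alt petals petal_size
instance (petals : Int) (petal_size : Int) (out : List (List Int)) : Decidable (Spec_flower_generation petals petal_size out) := by unfold Spec_flower_generation; infer_instance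

-- ===== CLAIM (what is proved, stated in full; the proofs are below) =====
def Claim_equal_flower_generation : Prop := ∀ (petals : Int) (petal_size : Int), Dom_flower_generation petals petal_size → Spec_flower_generation petals petal_size (flower_generation petals petal_size)

-- ===== LEMMAS AND PROOFS =====

-- the edge at position j of petal p (0 ≤ j ≤ m), in closed form
def pvE (m p j : Int) : List Int :=
  [if j = 0 then 0 else p * m + j, if j = m then 0 else p * m + j + 1]

-- B's per-index edge
def pvEdge (m k : Int) : List Int :=
  pvE m (PySem.Int.floordiv k (m + 1)) (PySem.Int.mod k (m + 1))

-- the node chain node, node+1, …, node+n-1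
def pvSeq (node : Int) (n : Nat) : List Int := (List.range n).map (fun (k : Nat) => node + (k : Int))

theorem pvSeq_succ (node : Int) (n : Nat) : pvSeq node (n + 1) = node :: pvSeq (node + 1) n := by
  unfold pvSeq
  rw [List.range_succ_eq_map, List.map_cons, List.map_map]
  refine congrArg₂ _ (by simp) (List.map_congr_left fun k _ => ?_)
  simp only [Function.comp_apply]
  push_cast; ring

theorem pyRange_eq_pvSeq (a b : Int) : PySem.List.pyRange a b 1 = pvSeq a (b - a).toNat := by
  rw [PySem.List.pyRange_one]
  simp [pvSeq]

-- characterisation of A's inner while loop as consecutive pairs of a node chain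
theorem pvInnerA_chain (n : Nat) : ∀ (prev node : Int) (g : List (List Int)),
    pvInnerA (node + n - 1) prev node g
      = (g ++ List.zipWith (fun a b => [a, b]) (prev :: pvSeq node n) (pvSeq node n),
         if n = 0 then prev else node + n - 1,
         node + n) := by
  induction n with
  | zero =>
      intro prev node g
      rw [pvInnerA]
      simp [pvSeq]
  | succ m ih =>
      intro prev node g
      rw [pvInnerA, if_pos (by push_cast; omega)]
      have hb : node + (↑(m + 1) : Int) - 1 = (node + 1) + (↑m : Int) - 1 := by push_cast; ring
      rw [hb, ih node (node + 1) (g ++ [[prev, node]]), pvSeq_succ]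
      simp only [Prod.mk.injEq]
      refine ⟨by simp, ?_, by push_cast; ring⟩
      rw [if_neg (by omega : ¬ (m + 1 = 0))]
      by_cases h : m = 0
      · rw [if_pos h, h]; simp
      · rw [if_neg h]

-- self-zip of an 'a :: chain ++ [0]' cycle, in indexed closed form
theorem pvZipSelf (n : Nat) : ∀ (a s : Int),
    List.zipWith (fun x y => [x, y]) (a :: (pvSeq s n ++ [0])) (pvSeq s n ++ [0])
      = (List.range (n + 1)).map
          (fun (j : Nat) => [if j = 0 then a else s + (j : Int) - 1,
                             if j = n then 0 else s + (j : Int)]) := by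
  induction n with
  | zero => intro a s; simp [pvSeq]
  | succ m ih =>
      intro a s
      rw [pvSeq_succ]
      simp only [List.cons_append, List.zipWith_cons_cons]
      rw [ih s (s + 1)]
      conv_rhs => rw [List.range_succ_eq_map]
      simp only [List.map_cons, List.map_map]
      congr 1
      · norm_num
      · refine List.map_congr_left fun j hj => ?_
        simp only [Function.comp_apply]
        simp only [List.cons.injEq, and_true]
        constructor
        · split_ifs <;> (try exact (‹False›).elim) <;> (try push_cast [Nat.succ_eq_add_one]) <;> omega
        · split_ifs <;> (try push_cast [Nat.succ_eq_add_one]) <;> omega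

theorem pvFlatMap_congr {α β : Type} (l : List α) (f g : α → List β)
    (h : ∀ x ∈ l, f x = g x) : l.flatMap f = l.flatMap g := by
  induction l with
  | nil => rfl
  | cons x l' ih =>
      simp only [List.flatMap_cons]
      rw [h x (List.mem_cons_self ..), ih (fun y hy => h y (List.mem_cons_of_mem _ hy))]

-- divmod of a block-indexed k
theorem pvDivMod_block (m p j : Int) (hm : 0 ≤ m) (hj : 0 ≤ j) (hjm : j ≤ m) :
    PySem.Int.floordiv (p * (m + 1) + j) (m + 1) = p ∧
    PySem.Int.mod (p * (m + 1) + j) (m + 1) = j := by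
  have hq : PySem.Int.floordiv (p * (m + 1) + j) (m + 1) = p := by
    rw [PySem.Int.floordiv_eq_iff_of_pos (by omega)]
    constructor
    · omega
    · have : (p + 1) * (m + 1) = p * (m + 1) + (m + 1) := by ring
      omega
  refine ⟨hq, ?_⟩
  have h := PySem.Int.floordiv_mul_add_mod (p * (m + 1) + j) (m + 1)
  rw [hq] at h
  omega

-- B's edge at an in-block index equals the closed-form petal edge
theorem pvEdge_block (m p : Int) (j : Nat) (hm : 0 ≤ m) (hj : (j : Int) ≤ m) :
    pvEdge m (p * (m + 1) + (j : Int)) = pvE m p (j : Int) := by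
  obtain ⟨h1, h2⟩ := pvDivMod_block m p (j : Int) hm (by positivity) hj
  unfold pvEdge
  rw [h1, h2]

-- one petal's block of B's flat range, mapped, is the petal's edge list
theorem pvMap_block (m p : Int) (hm : 0 ≤ m) :
    (PySem.List.pyRange (p * (m + 1)) ((p + 1) * (m + 1)) 1).map (pvEdge m)
      = (PySem.List.pyRange 0 (m + 1) 1).map (pvE m p) := by
  rw [PySem.List.pyRange_one, PySem.List.pyRange_one]
  have hlen : ((p + 1) * (m + 1) - p * (m + 1)).toNat = (m + 1 - 0).toNat := by
    have : (p + 1) * (m + 1) = p * (m + 1) + (m + 1) := by ring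
    omega
  rw [hlen, List.map_map, List.map_map]
  refine List.map_congr_left fun j hj => ?_
  have hjlt : j < (m + 1 - 0).toNat := List.mem_range.1 hj
  simp only [Function.comp_apply]
  rw [pvEdge_block m p j hm (by omega)]
  norm_num

-- B's flat map splits into per-petal blocks
theorem pvB_flat (m : Int) (hm : 0 ≤ m) : ∀ (N : Nat),
    (PySem.List.pyRange 0 ((N : Int) * (m + 1)) 1).map (pvEdge m)
      = (PySem.List.pyRange 0 (N : Int) 1).flatMap
          (fun p => (PySem.List.pyRange 0 (m + 1) 1).map (pvE m p)) := by
  intro N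
  induction N with
  | zero => simp [PySem.List.pyRange_one_eq_nil]
  | succ N ih =>
      have hN : (0 : Int) ≤ (N : Int) := by positivity
      have hcast : ((N + 1 : Nat) : Int) = (N : Int) + 1 := by push_cast; ring
      have hmono : (N : Int) * (m + 1) ≤ ((N : Int) + 1) * (m + 1) := by nlinarith
      have h0 : (0 : Int) ≤ (N : Int) * (m + 1) := by positivity
      rw [hcast, PySem.List.pyRange_one_append 0 ((N : Int) * (m + 1)) (((N : Int) + 1) * (m + 1)) h0 hmono]
      rw [List.map_append, ih]
      rw [PySem.List.pyRange_one_succ_right hN, List.flatMap_append]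
      rw [pvMap_block m (N : Int) hm]
      simp

-- B equals the flat map of pvEdge
theorem pvB_eq_map (petals ps : Int) :
    flower_generation_alt petals ps
      = (PySem.List.pyRange 0 (petals * (max ps 0 + 1)) 1).map (pvEdge (max ps 0)) := by
  unfold flower_generation_alt
  show List.foldl (fun edges k => edges ++ [pvEdge (max ps 0) k]) []
        (PySem.List.pyRange 0 (petals * (max ps 0 + 1)) 1)
      = (PySem.List.pyRange 0 (petals * (max ps 0 + 1)) 1).map (pvEdge (max ps 0))
  rw [PySem.List.foldl_append_singleton_eq_map]
  simp

-- one petal's zip-cycle equals the closed-form petal edge list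
theorem pvPetal_eq (ps p : Int) :
    List.zipWith (fun a b => [a, b])
        ([0] ++ PySem.List.pyRange (p * ps + 1) (p * ps + ps + 1) 1 ++ [0])
        (([0] ++ PySem.List.pyRange (p * ps + 1) (p * ps + ps + 1) 1 ++ [0]).tail)
      = (PySem.List.pyRange 0 (max ps 0 + 1) 1).map (pvE (max ps 0) p) := by
  by_cases hps : ps ≤ 0
  · have hm : max ps 0 = 0 := max_eq_right hps
    rw [hm, PySem.List.pyRange_one_eq_nil (by omega), PySem.List.pyRange_one]
    norm_num [pvE]
  · have hm : max ps 0 = ps := max_eq_left (by omega)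
    rw [hm]
    clear hm
    rw [pyRange_eq_pvSeq,
      show (p * ps + ps + 1 - (p * ps + 1)).toNat = ps.toNat from by omega]
    simp only [List.cons_append, List.nil_append, List.tail_cons]
    rw [pvZipSelf ps.toNat 0 (p * ps + 1), PySem.List.pyRange_one, List.map_map]
    have hlen : (ps + 1 - 0).toNat = ps.toNat + 1 := by omega
    rw [hlen]
    refine List.map_congr_left fun j hj => ?_
    have hjlt : j < ps.toNat + 1 := List.mem_range.1 hj
    simp only [Function.comp_apply]
    unfold pvE
    simp only [List.cons.injEq, and_true]
    constructor
    · split_ifs <;> push_cast at * <;> omega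
    · split_ifs <;> push_cast at * <;> omega

-- fold invariant, ps ≤ 0: the inner loop never runs and node stays 1
theorem fold_eq_nonpos (ps : Int) (hps : ps ≤ 0) (l : List Int) (hl : ∀ p ∈ l, 0 ≤ p) :
    ∀ (g : List (List Int)),
    (l.foldl
      (fun (s : List (List Int) × Int) petal =>
        let r := pvInnerA (petal * ps + ps) 0 s.2 s.1
        (r.1 ++ [[r.2.1, 0]], r.2.2))
      (g, 1))
    = (l.foldl
        (fun acc p =>
          acc ++ List.zipWith (fun a b => [a, b])
            ([0] ++ PySem.List.pyRange (p * ps + 1) (p * ps + ps + 1) 1 ++ [0])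
            (([0] ++ PySem.List.pyRange (p * ps + 1) (p * ps + ps + 1) 1 ++ [0]).tail))
        g, 1) := by
  induction l with
  | nil => intro g; rfl
  | cons p l' ih =>
      intro g
      have hp : 0 ≤ p := hl p (List.mem_cons_self ..)
      have hmul : p * ps ≤ 0 := mul_nonpos_of_nonneg_of_nonpos hp hps
      simp only [List.foldl_cons]
      rw [pvInnerA, if_neg (by omega)]
      rw [PySem.List.pyRange_one_eq_nil (by omega)]
      exact ih (fun q hq => hl q (List.mem_cons_of_mem _ hq)) (g ++ [[0, 0]])

-- the last element of the node chain
theorem pvSeq_getLastD (node : Int) (n : Nat) :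
    (pvSeq node n).getLastD 0 = if n = 0 then 0 else node + n - 1 := by
  cases n with
  | zero => simp [pvSeq]
  | succ m =>
      unfold pvSeq
      rw [List.range_succ, List.map_append]
      simp only [List.map_cons, List.map_nil, List.getLastD_concat]
      push_cast
      omega

-- pairing a path that ends in an appended element
theorem zipWith_pairs_concat (L : List Int) : ∀ (a c : Int),
    List.zipWith (fun x y => [x, y]) (a :: (L ++ [c])) (L ++ [c])
      = List.zipWith (fun x y => [x, y]) (a :: L) L ++ [[L.getLastD a, c]] := by
  induction L with
  | nil => intro a c; simp
  | cons x L' ih =>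
      intro a c
      simp only [List.cons_append, List.zipWith_cons_cons, ih x c, List.getLastD_cons]

-- one petal of A (inner loop then the closing edge), in zip-cycle form
theorem petal_step (ps : Int) (hps : 1 ≤ ps) (p : Int) (G : List (List Int)) :
    ((pvInnerA (p * ps + ps) 0 (p * ps + 1) G).1
        ++ [[(pvInnerA (p * ps + ps) 0 (p * ps + 1) G).2.1, 0]],
      (pvInnerA (p * ps + ps) 0 (p * ps + 1) G).2.2)
    = (G ++ List.zipWith (fun a b => [a, b])
          ([0] ++ PySem.List.pyRange (p * ps + 1) (p * ps + ps + 1) 1 ++ [0])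
          (([0] ++ PySem.List.pyRange (p * ps + 1) (p * ps + ps + 1) 1 ++ [0]).tail),
        (p + 1) * ps + 1) := by
  have hn0 : ps.toNat ≠ 0 := by omega
  have hchain := pvInnerA_chain ps.toNat 0 (p * ps + 1) G
  rw [show (p * ps + 1) + ((ps.toNat : Nat) : Int) - 1 = p * ps + ps from by omega,
      if_neg hn0] at hchain
  rw [hchain]
  rw [pyRange_eq_pvSeq,
    show (p * ps + ps + 1 - (p * ps + 1)).toNat = ps.toNat from by omega]
  simp only [List.cons_append, List.nil_append, List.tail_cons]
  rw [zipWith_pairs_concat (pvSeq (p * ps + 1) ps.toNat) 0 0, pvSeq_getLastD, if_neg hn0]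
  simp only [Prod.mk.injEq]
  refine ⟨?_, ?_⟩
  · rw [List.append_assoc]
    have : p * ps + 1 + ((ps.toNat : Nat) : Int) - 1 = p * ps + ps := by omega
    rw [this]
  · have : ((ps.toNat : Nat) : Int) = ps := by omega
    rw [this]; ring

-- fold invariant, ps ≥ 1: after m petals node = m*ps + 1
theorem fold_eq_pos (ps : Int) (hps : 1 ≤ ps) (m : Nat) :
    ((PySem.List.pyRange 0 (m : Int) 1).foldl
      (fun (s : List (List Int) × Int) petal =>
        let r := pvInnerA (petal * ps + ps) 0 s.2 s.1
        (r.1 ++ [[r.2.1, 0]], r.2.2))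
      ([], 1))
    = ((PySem.List.pyRange 0 (m : Int) 1).foldl
        (fun acc p =>
          acc ++ List.zipWith (fun a b => [a, b])
            ([0] ++ PySem.List.pyRange (p * ps + 1) (p * ps + ps + 1) 1 ++ [0])
            (([0] ++ PySem.List.pyRange (p * ps + 1) (p * ps + ps + 1) 1 ++ [0]).tail))
        [], (m : Int) * ps + 1) := by
  induction m with
  | zero =>
      rw [PySem.List.pyRange_one_eq_nil (by omega)]
      simp
  | succ m ih =>
      have hm1 : ((↑(m + 1) : Int)) = (m : Int) + 1 := by push_cast; ring
      rw [hm1, PySem.List.pyRange_one_succ_right (by positivity), List.foldl_append,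
        List.foldl_append, ih]
      simp only [List.foldl_cons, List.foldl_nil]
      rw [petal_step ps hps (m : Int)]

-- A in zip-cycle flatMap form
theorem pvA_flat (petals ps : Int) :
    flower_generation petals ps
      = (PySem.List.pyRange 0 petals 1).flatMap
          (fun p => List.zipWith (fun a b => [a, b])
            ([0] ++ PySem.List.pyRange (p * ps + 1) (p * ps + ps + 1) 1 ++ [0])
            (([0] ++ PySem.List.pyRange (p * ps + 1) (p * ps + ps + 1) 1 ++ [0]).tail)) := by
  unfold flower_generation
  have hfold : ((PySem.List.pyRange 0 petals 1).foldl
      (fun (s : List (List Int) × Int) petal =>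
        let r := pvInnerA (petal * ps + ps) 0 s.2 s.1
        (r.1 ++ [[r.2.1, 0]], r.2.2))
      ([], 1)).1
    = (PySem.List.pyRange 0 petals 1).foldl
        (fun acc p =>
          acc ++ List.zipWith (fun a b => [a, b])
            ([0] ++ PySem.List.pyRange (p * ps + 1) (p * ps + ps + 1) 1 ++ [0])
            (([0] ++ PySem.List.pyRange (p * ps + 1) (p * ps + ps + 1) 1 ++ [0]).tail))
        [] := by
    by_cases hps : ps ≤ 0
    · rw [fold_eq_nonpos ps hps (PySem.List.pyRange 0 petals 1)
        (fun p hp => ((PySem.List.mem_pyRange_one).1 hp).1) []]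
    · by_cases hpet : petals ≤ 0
      · rw [PySem.List.pyRange_one_eq_nil hpet]
        rfl
      · have hm : petals = ((petals.toNat : Nat) : Int) := by omega
        rw [hm, fold_eq_pos ps (by omega) petals.toNat]
  rw [hfold, PySem.List.foldl_append_eq_flatMap]
  simp

-- ===== VERDICT (by name: the statement is the Claim_ definition above) =====
theorem flower_generation_spec : Claim_equal_flower_generation := by
  intro petals ps _
  unfold Spec_flower_generation
  rw [pvA_flat petals ps, pvB_eq_map petals ps]
  have hm : (0 : Int) ≤ max ps 0 := le_max_right ps 0
  by_cases hpet : petals ≤ 0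
  · rw [PySem.List.pyRange_one_eq_nil hpet,
      PySem.List.pyRange_one_eq_nil
        (mul_nonpos_of_nonpos_of_nonneg hpet (by linarith [le_max_right ps 0] : (0:Int) ≤ max ps 0 + 1))]
    rfl
  · have hN : petals = ((petals.toNat : Nat) : Int) := by omega
    rw [hN, pvB_flat (max ps 0) hm petals.toNat]
    exact pvFlatMap_congr _ _ _ (fun p hp => pvPetal_eq ps p)
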